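-- pv_equiv track=rewrite | github.com/sunyinggilly/flowIntention | Utils/util_read.py | get_timelst
-- ===== SOURCE A (Python) =====
-- def get_timelst(tfrom, tto):
--     tnow_year, tnow_month = tfrom
--     tend_year, tend_month = tto
--     lst = ['%d%02d' % (tnow_year, tnow_month)]
--     while tnow_year != tend_year or tnow_month != tend_month:
--         tnow_year += tnow_month // 12
--         tnow_month = tnow_month % 12 + 1
--         lst.append(month_str(tnow_year, tnow_month))
--     return lst
--
-- def month_str(year, month):
--     return '%d%02d' % (year, month)
-- ===== SOURCE B (Python) =====
-- def get_timelst(tfrom, tto):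
--     n = (tto[0] - tfrom[0]) * 12 + (tto[1] - tfrom[1])
--     base = tfrom[0] * 12 + tfrom[1] - 1
--     return ['%d%02d' % (tfrom[0], tfrom[1])] + \
--         ['%d%02d' % ((base + i) // 12, (base + i) % 12 + 1) for i in range(1, n + 1)]
-- ===== Notes on version B (the rewrite author's own statement) =====
-- stated objective: simpler
-- what changed: Replaces the month-by-month while-loop accumulator with a closed-form month count and a comprehension over absolute month indices (divmod arithmetic); also terminates on descending ranges where A's while-loop runs forever (those inputs are outside Pre_).
import Mathlib
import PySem

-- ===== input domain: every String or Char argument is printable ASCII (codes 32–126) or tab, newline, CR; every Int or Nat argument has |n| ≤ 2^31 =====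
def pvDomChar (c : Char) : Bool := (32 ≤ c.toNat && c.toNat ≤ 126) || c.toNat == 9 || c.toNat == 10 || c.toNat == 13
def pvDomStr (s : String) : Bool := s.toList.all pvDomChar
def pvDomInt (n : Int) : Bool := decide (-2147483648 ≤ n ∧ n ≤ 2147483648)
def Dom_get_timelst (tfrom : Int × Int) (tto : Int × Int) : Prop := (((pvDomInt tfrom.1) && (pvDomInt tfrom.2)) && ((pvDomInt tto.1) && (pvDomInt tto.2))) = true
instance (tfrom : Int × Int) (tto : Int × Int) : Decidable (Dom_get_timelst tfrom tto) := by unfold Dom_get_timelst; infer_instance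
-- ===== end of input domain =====

-- B replaces A's month-by-month while-loop with a closed-form month count and a map over
-- absolute month indices (objective: simpler decomposition).

-- ===== PORT A =====
-- '%d%02d' % (year, month): exact for every int year/month ('%02d' zero-pads only when
-- str(month) is a single character, i.e. 0 ≤ month ≤ 9; a negative month already has ≥ 2 chars).
def pvMonthStr (year month : Int) : String :=
  PySem.Int.toStr year ++ (if 0 ≤ month ∧ month < 10 then "0" ++ PySem.Int.toStr month else PySem.Int.toStr month)

-- A's while-loop; fuel-driven to make it total (Python's loop diverges exactly on the inputs
-- Pre_get_timelst excludes, and the supplied fuel is sufficient on all of Pre_).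
def pvLoopA (tend_year tend_month : Int) : Nat → Int → Int → List String → List String
  | 0, _, _, lst => lst
  | fuel+1, y, m, lst =>
    if y ≠ tend_year ∨ m ≠ tend_month then
      let y' := y + PySem.Int.floordiv m 12
      let m' := PySem.Int.mod m 12 + 1
      pvLoopA tend_year tend_month fuel y' m' (lst ++ [pvMonthStr y' m'])
    else lst

def get_timelst (tfrom : Int × Int) (tto : Int × Int) : List String :=
  pvLoopA tto.1 tto.2 ((12 * (tto.1 - tfrom.1) + (tto.2 - tfrom.2)).toNat + 1)
    tfrom.1 tfrom.2 [pvMonthStr tfrom.1 tfrom.2]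

-- ===== PORT B =====
def get_timelst_alt (tfrom : Int × Int) (tto : Int × Int) : List String :=
  -- n = (tto[0]-tfrom[0])*12 + (tto[1]-tfrom[1]); base = tfrom[0]*12 + tfrom[1] - 1 (inlined)
  pvMonthStr tfrom.1 tfrom.2 ::
    (PySem.List.pyRange 1 ((tto.1 - tfrom.1) * 12 + (tto.2 - tfrom.2) + 1) 1).map (fun i =>
      pvMonthStr (PySem.Int.floordiv (tfrom.1 * 12 + tfrom.2 - 1 + i) 12)
                 (PySem.Int.mod (tfrom.1 * 12 + tfrom.2 - 1 + i) 12 + 1))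

-- ===== PRECONDITION & SPEC =====
-- Pre_ excludes exactly the inputs on which A's while-loop never terminates (tto not reachable
-- from tfrom by repeated month increments): A returns a value precisely on Pre_.
def Pre_get_timelst (tfrom : Int × Int) (tto : Int × Int) : Prop :=
  tfrom = tto ∨ (1 ≤ tto.2 ∧ tto.2 ≤ 12 ∧ 12 * tfrom.1 + tfrom.2 < 12 * tto.1 + tto.2)
instance (tfrom : Int × Int) (tto : Int × Int) : Decidable (Pre_get_timelst tfrom tto) := by
  unfold Pre_get_timelst; infer_instance

def pvWitness_get_timelst : (Int × Int) × (Int × Int) := ((2020, 11), (2021, 2))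

def Spec_get_timelst (tfrom : Int × Int) (tto : Int × Int) (out : List String) : Prop := out = get_timelst_alt tfrom tto
instance (tfrom : Int × Int) (tto : Int × Int) (out : List String) : Decidable (Spec_get_timelst tfrom tto out) := by unfold Spec_get_timelst; infer_instance

-- ===== CLAIM (what is proved, stated in full; the proofs are below) =====
def Claim_equal_get_timelst : Prop := ∀ (tfrom : Int × Int) (tto : Int × Int), Dom_get_timelst tfrom tto → Pre_get_timelst tfrom tto → Spec_get_timelst tfrom tto (get_timelst tfrom tto)

-- ===== LEMMAS AND PROOFS =====

-- the month string of absolute month index j (index = 12*year + month - 1)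
def pvElt (j : Int) : String :=
  pvMonthStr (PySem.Int.floordiv j 12) (PySem.Int.mod j 12 + 1)

-- the d month strings of indices j, j+1, ..., j+d-1
def pvBuild (j : Int) : Nat → List String
  | 0 => []
  | d+1 => pvElt j :: pvBuild (j + 1) d

theorem pvElt_shift (y m : Int) :
    pvElt (12 * y + m) = pvMonthStr (y + PySem.Int.floordiv m 12) (PySem.Int.mod m 12 + 1) := by
  have hdm := PySem.Int.floordiv_mul_add_mod m 12
  have hdm' := PySem.Int.floordiv_mul_add_mod (12 * y + m) 12
  have hr1 : 0 ≤ PySem.Int.mod m 12 := PySem.Int.mod_nonneg m (by omega)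
  have hr2 : PySem.Int.mod m 12 < 12 := PySem.Int.mod_lt m (by omega)
  have hq1 : 0 ≤ PySem.Int.mod (12 * y + m) 12 := PySem.Int.mod_nonneg _ (by omega)
  have hq2 : PySem.Int.mod (12 * y + m) 12 < 12 := PySem.Int.mod_lt _ (by omega)
  have hfd : PySem.Int.floordiv (12 * y + m) 12 = y + PySem.Int.floordiv m 12 := by omega
  have hmd : PySem.Int.mod (12 * y + m) 12 = PySem.Int.mod m 12 := by omega
  simp only [pvElt]
  rw [hfd, hmd]

theorem pvLoopA_eq (yt mt : Int) (h1 : 1 ≤ mt) (h2 : mt ≤ 12) :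
    ∀ (d : Nat) (y m : Int) (acc : List String), 1 ≤ m → m ≤ 12 →
      12 * yt + mt = 12 * y + m + d →
      pvLoopA yt mt (d + 1) y m acc = acc ++ pvBuild (12 * y + m) d := by
  intro d
  induction d with
  | zero =>
    intro y m acc hm1 hm2 hidx
    have : y = yt ∧ m = mt := by simp at hidx; omega
    obtain ⟨rfl, rfl⟩ := this
    simp [pvLoopA, pvBuild]
  | succ d ih =>
    intro y m acc hm1 hm2 hidx
    have hne : y ≠ yt ∨ m ≠ mt := by
      by_contra h
      push_neg at h
      push_cast at hidx
      omega
    have hdm := PySem.Int.floordiv_mul_add_mod m 12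
    have hr1 : 0 ≤ PySem.Int.mod m 12 := PySem.Int.mod_nonneg m (by omega)
    have hr2 : PySem.Int.mod m 12 < 12 := PySem.Int.mod_lt m (by omega)
    rw [pvLoopA, if_pos hne]
    rw [ih (y + PySem.Int.floordiv m 12) (PySem.Int.mod m 12 + 1) _ (by omega) (by omega)
      (by push_cast at hidx ⊢; omega)]
    rw [pvBuild, ← pvElt_shift y m]
    have hj : 12 * (y + PySem.Int.floordiv m 12) + (PySem.Int.mod m 12 + 1) = 12 * y + m + 1 := by
      omega
    rw [hj]
    simp

theorem pvBuild_eq_range : ∀ (d : Nat) (j : Int),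
    pvBuild j d = (List.range d).map (fun k : Nat => pvElt (j + (k : Int))) := by
  intro d
  induction d with
  | zero => intro j; simp [pvBuild]
  | succ d ih =>
    intro j
    rw [pvBuild, ih (j + 1), List.range_succ_eq_map, List.map_cons, List.map_map]
    congr 1
    · norm_num
    · apply List.map_congr_left
      intro k _
      simp only [Function.comp_apply]
      congr 1
      push_cast
      ring

theorem pvMap_pyRange_eq_build (d : Nat) (base : Int) :
    (PySem.List.pyRange 1 ((d : Int) + 1) 1).map (fun i =>
        pvMonthStr (PySem.Int.floordiv (base + i) 12) (PySem.Int.mod (base + i) 12 + 1))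
      = pvBuild (base + 1) d := by
  rw [PySem.List.pyRange_one, pvBuild_eq_range, List.map_map]
  have hd : ((d : Int) + 1 - 1).toNat = d := by omega
  rw [hd]
  apply List.map_congr_left
  intro k _
  simp only [Function.comp_apply]
  rw [show base + (1 + (k : Int)) = base + 1 + (k : Int) by ring]
  rfl

-- ===== VERDICT (by name: the statement is the Claim_ definition above) =====
theorem get_timelst_spec : Claim_equal_get_timelst := by
  intro tfrom tto _hDom hPre
  obtain ⟨y0, m0⟩ := tfrom
  obtain ⟨yt, mt⟩ := tto
  unfold Spec_get_timelst
  show get_timelst (y0, m0) (yt, mt) = get_timelst_alt (y0, m0) (yt, mt)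
  have hgoal :
      (get_timelst (y0, m0) (yt, mt)
        = pvLoopA yt mt ((12 * (yt - y0) + (mt - m0)).toNat + 1) y0 m0 [pvMonthStr y0 m0])
      ∧ (get_timelst_alt (y0, m0) (yt, mt)
        = pvMonthStr y0 m0 ::
            (PySem.List.pyRange 1 ((yt - y0) * 12 + (mt - m0) + 1) 1).map (fun i =>
              pvMonthStr (PySem.Int.floordiv (y0 * 12 + m0 - 1 + i) 12)
                         (PySem.Int.mod (y0 * 12 + m0 - 1 + i) 12 + 1))) := ⟨rfl, rfl⟩
  rw [hgoal.1, hgoal.2]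
  rcases hPre with heq | ⟨h1, h2, hlt⟩
  · -- tfrom = tto: A's loop stops at once, B's range is empty
    injection heq with hy hm
    subst hy
    subst hm
    rw [show (12 * (y0 - y0) + (m0 - m0)).toNat + 1 = 1 by omega]
    rw [PySem.List.pyRange_one_eq_nil (by omega)]
    simp [pvLoopA]
  · simp only at h1 h2 hlt
    have hdm := PySem.Int.floordiv_mul_add_mod m0 12
    have hr1 : 0 ≤ PySem.Int.mod m0 12 := PySem.Int.mod_nonneg m0 (by omega)
    have hr2 : PySem.Int.mod m0 12 < 12 := PySem.Int.mod_lt m0 (by omega)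
    -- the loop runs 12*(yt - y0) + (mt - m0) times; peel off its first, possibly
    -- non-normalised, iteration and describe the rest with pvLoopA_eq
    rw [show (12 * (yt - y0) + (mt - m0)).toNat + 1
        = (((12 * (yt - y0) + (mt - m0) - 1).toNat + 1) + 1) by omega]
    have hne : y0 ≠ yt ∨ m0 ≠ mt := by by_contra h; push_neg at h; omega
    rw [pvLoopA, if_pos hne]
    have hidx : 12 * yt + mt
        = 12 * (y0 + PySem.Int.floordiv m0 12) + (PySem.Int.mod m0 12 + 1)
          + (((12 * (yt - y0) + (mt - m0) - 1).toNat : Nat) : Int) := by omega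
    have hb1 : (1 : Int) ≤ PySem.Int.mod m0 12 + 1 := by omega
    have hb2 : PySem.Int.mod m0 12 + 1 ≤ 12 := by omega
    rw [pvLoopA_eq yt mt h1 h2 ((12 * (yt - y0) + (mt - m0) - 1).toNat)
      (y0 + PySem.Int.floordiv m0 12) (PySem.Int.mod m0 12 + 1) _ hb1 hb2 hidx]
    rw [show (yt - y0) * 12 + (mt - m0) + 1
        = ((((12 * (yt - y0) + (mt - m0) - 1).toNat + 1 : Nat)) : Int) + 1 by push_cast; omega]
    rw [pvMap_pyRange_eq_build ((12 * (yt - y0) + (mt - m0) - 1).toNat + 1) (y0 * 12 + m0 - 1)]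
    rw [show (y0 * 12 + m0 - 1 + 1) = 12 * y0 + m0 by ring]
    rw [pvBuild, ← pvElt_shift y0 m0]
    rw [show 12 * (y0 + PySem.Int.floordiv m0 12) + (PySem.Int.mod m0 12 + 1)
        = 12 * y0 + m0 + 1 by omega]
    simp
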